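-- pv_equiv track=rewrite | github.com/yamadasuzaku/rksysoft | heates107/scripts/heates_make_grouptrigger_from_hdf5.py | build_grouptrigger_map
-- ===== SOURCE A (Python) =====
-- def build_grouptrigger_map(alive_channels):
--     """
--     Build group-trigger mapping using only alive pixels.
--
--     Rules
--     -----
--     - Interior pixel:
--         use immediate alive neighbors on both sides
--         e.g. 2 -> [1, 3]
--     - Edge pixel:
--         round inward using the nearest two alive channels
--         e.g. 0 -> [1, 2]
--              4 -> [2, 3]
--     """
--     result = {}
--
--     if len(alive_channels) == 0:
--         return result
--
--     if len(alive_channels) == 1: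
--         ch = alive_channels[0]
--         result[str(ch)] = [ch, ch]
--         return result
--
--     if len(alive_channels) == 2:
--         ch0, ch1 = alive_channels
--         result[str(ch0)] = [ch1, ch1]
--         result[str(ch1)] = [ch0, ch0]
--         return result
--
--     for index, ch in enumerate(alive_channels):
--         if index == 0:
--             neighbors = [alive_channels[1], alive_channels[2]]
--         elif index == len(alive_channels) - 1:
--             neighbors = [alive_channels[-3], alive_channels[-2]]
--         else:
--             neighbors = [alive_channels[index - 1], alive_channels[index + 1]]
--
--         result[str(ch)] = neighbors
--
--     return result
-- ===== SOURCE B (Python) =====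
-- def build_grouptrigger_map(alive_channels):
--     """Build the two neighbor columns as whole shifted/sliced lists, then zip."""
--     a = alive_channels
--     if len(a) < 3:
--         lefts = rights = a[::-1]
--     else:
--         lefts = [a[1]] + a[:-2] + [a[-3]]
--         rights = [a[2]] + a[2:] + [a[-2]]
--     return {str(ch): [lo, hi] for ch, lo, hi in zip(a, lefts, rights)}
-- ===== Notes on version B (the rewrite author's own statement) =====
-- stated objective: alternative
-- what changed: Instead of a per-index loop with positional branches, B builds the two neighbor columns wholesale as shifted/sliced lists ([a[1]]+a[:-2]+[a[-3]] and [a[2]]+a[2:]+[a[-2]], or the reversed list for len<3) and zips them with the channels into the dict in one comprehension.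
import Mathlib
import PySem

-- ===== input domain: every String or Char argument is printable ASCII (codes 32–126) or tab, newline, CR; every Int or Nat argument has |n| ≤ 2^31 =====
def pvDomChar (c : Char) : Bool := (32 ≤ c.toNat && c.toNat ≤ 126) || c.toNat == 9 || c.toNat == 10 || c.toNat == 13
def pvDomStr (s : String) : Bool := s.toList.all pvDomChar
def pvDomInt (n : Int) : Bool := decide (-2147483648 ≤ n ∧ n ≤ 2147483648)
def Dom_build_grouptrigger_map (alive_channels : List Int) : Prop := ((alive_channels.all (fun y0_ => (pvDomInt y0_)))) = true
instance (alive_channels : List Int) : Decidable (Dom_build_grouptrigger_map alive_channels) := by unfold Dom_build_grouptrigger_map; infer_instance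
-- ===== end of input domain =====

-- B builds the two neighbor columns wholesale as shifted/sliced lists and zips them with the
-- channels into the dict, instead of A's per-index loop with positional branches (objective: alternative).

-- ===== PORT A =====
def build_grouptrigger_map (alive_channels : List Int) : List (String × List Int) :=
  if alive_channels.length == 0 then (PySem.Dict.empty (κ := String) (ν := List Int)).items
  else if alive_channels.length == 1 then
    let ch := PySem.List.pyGetD alive_channels 0 0
    ((PySem.Dict.empty).insert (PySem.Int.toStr ch) [ch, ch]).items
  else if alive_channels.length == 2 then
    let ch0 := PySem.List.pyGetD alive_channels 0 0
    let ch1 := PySem.List.pyGetD alive_channels 1 0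
    (((PySem.Dict.empty).insert (PySem.Int.toStr ch0) [ch1, ch1]).insert
        (PySem.Int.toStr ch1) [ch0, ch0]).items
  else
    ((PySem.List.enumerate alive_channels 0).foldl (fun r p =>
        let neighbors :=
          if p.1 == 0 then
            [PySem.List.pyGetD alive_channels 1 0, PySem.List.pyGetD alive_channels 2 0]
          else if p.1 == (alive_channels.length : Int) - 1 then
            [PySem.List.pyGetD alive_channels (-3) 0, PySem.List.pyGetD alive_channels (-2) 0]
          else
            [PySem.List.pyGetD alive_channels (p.1 - 1) 0,
             PySem.List.pyGetD alive_channels (p.1 + 1) 0]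
        r.insert (PySem.Int.toStr p.2) neighbors) PySem.Dict.empty).items

-- ===== PORT B =====
def build_grouptrigger_map_alt (alive_channels : List Int) : List (String × List Int) :=
  let a := alive_channels
  let lr : List Int × List Int :=
    if a.length < 3 then
      let r := (PySem.List.slice? a none none (-1)).getD []   -- a[::-1] (step ≠ 0, so `some`)
      (r, r)
    else
      ([PySem.List.pyGetD a 1 0] ++ PySem.List.slice a none (some (-2))
         ++ [PySem.List.pyGetD a (-3) 0],
       [PySem.List.pyGetD a 2 0] ++ PySem.List.slice a (some 2) none
         ++ [PySem.List.pyGetD a (-2) 0])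
  -- dict comprehension over zip(a, lefts, rights)
  ((a.zip (lr.1.zip lr.2)).foldl (fun r p =>
      r.insert (PySem.Int.toStr p.1) [p.2.1, p.2.2]) PySem.Dict.empty).items

-- ===== PRECONDITION & SPEC =====
def Spec_build_grouptrigger_map (alive_channels : List Int) (out : List (String × List Int)) : Prop := out = build_grouptrigger_map_alt alive_channels
instance (alive_channels : List Int) (out : List (String × List Int)) : Decidable (Spec_build_grouptrigger_map alive_channels out) := by unfold Spec_build_grouptrigger_map; infer_instance

-- ===== CLAIM =====
def Claim_equal_build_grouptrigger_map : Prop := ∀ (alive_channels : List Int), Dom_build_grouptrigger_map alive_channels → Spec_build_grouptrigger_map alive_channels (build_grouptrigger_map alive_channels)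

-- ===== LEMMAS AND PROOFS =====

-- two insert-folds agree when the key/value sequences they insert agree
theorem bgm_foldins {α β : Type} (f₁ : α → String) (v₁ : α → List Int)
    (f₂ : β → String) (v₂ : β → List Int) (l₁ : List α) (l₂ : List β)
    (d : PySem.Dict String (List Int))
    (h : l₁.map (fun x => (f₁ x, v₁ x)) = l₂.map (fun x => (f₂ x, v₂ x))) :
    l₁.foldl (fun r x => r.insert (f₁ x) (v₁ x)) d
      = l₂.foldl (fun r x => r.insert (f₂ x) (v₂ x)) d := by
  induction l₁ generalizing l₂ d with
  | nil =>
    cases l₂ with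
    | nil => rfl
    | cons b t₂ => simp at h
  | cons a t ih =>
    cases l₂ with
    | nil => simp at h
    | cons b t₂ =>
      simp only [List.map_cons, List.cons.injEq] at h
      obtain ⟨hpair, ht⟩ := h
      have h1 : f₁ a = f₂ b := congrArg Prod.fst hpair
      have h2 : v₁ a = v₂ b := congrArg Prod.snd hpair
      simp only [List.foldl_cons, h1, h2]
      exact ih t₂ _ ht

-- element of a column built as  head :: (middle ++ [last])
theorem bgm_col_get (x z : Int) (t : List Int) (i : Nat)
    (h : i < (x :: (t ++ [z])).length) :
    (x :: (t ++ [z]))[i] =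
      if i = 0 then x else if ht : i - 1 < t.length then t[i - 1] else z := by
  have hlen : i < t.length + 2 := by
    simp at h; omega
  cases i with
  | zero => simp
  | succ j =>
    simp only [List.getElem_cons_succ, List.getElem_append]
    have hj : j + 1 - 1 = j := rfl
    rw [hj, if_neg (Nat.succ_ne_zero j)]
    by_cases h1 : j < t.length
    · rw [dif_pos h1, dif_pos h1]
    · rw [dif_neg h1, dif_neg h1]
      have hz : j - t.length = 0 := by omega
      simp [hz]

theorem bgm_main : ∀ (xs : List Int),
    build_grouptrigger_map xs = build_grouptrigger_map_alt xs := by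
  intro xs
  match xs with
  | [] =>
    simp [build_grouptrigger_map, build_grouptrigger_map_alt,
      PySem.List.slice?_none_none_neg_one]
  | [a] =>
    simp [build_grouptrigger_map, build_grouptrigger_map_alt,
      PySem.List.slice?_none_none_neg_one, PySem.List.pyGetD]
  | [a, b] =>
    simp [build_grouptrigger_map, build_grouptrigger_map_alt,
      PySem.List.slice?_none_none_neg_one, PySem.List.pyGetD]
  | a :: b :: c :: rest =>
    have h3 : 3 ≤ (a :: b :: c :: rest).length := by simp
    set ys : List Int := a :: b :: c :: rest with hys
    clear_value ys
    simp only [build_grouptrigger_map, build_grouptrigger_map_alt]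
    have l0 : (ys.length == 0) = false := by simp only [beq_eq_false_iff_ne, ne_eq]; omega
    have l1 : (ys.length == 1) = false := by simp only [beq_eq_false_iff_ne, ne_eq]; omega
    have l2 : (ys.length == 2) = false := by simp only [beq_eq_false_iff_ne, ne_eq]; omega
    have llt : ¬ (ys.length < 3) := by omega
    rw [l0, l1, l2, if_neg llt]
    simp only [Bool.false_eq_true, if_false]
    apply congrArg PySem.Dict.items
    refine bgm_foldins (fun p : Int × Int => PySem.Int.toStr p.2)
      (fun p : Int × Int =>
        if p.1 == 0 then
          [PySem.List.pyGetD ys 1 0, PySem.List.pyGetD ys 2 0]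
        else if p.1 == (ys.length : Int) - 1 then
          [PySem.List.pyGetD ys (-3) 0, PySem.List.pyGetD ys (-2) 0]
        else
          [PySem.List.pyGetD ys (p.1 - 1) 0, PySem.List.pyGetD ys (p.1 + 1) 0])
      (fun p : Int × (Int × Int) => PySem.Int.toStr p.1)
      (fun p : Int × (Int × Int) => [p.2.1, p.2.2]) _ _ _ ?_
    -- normalize B's columns to   head :: (middle ++ [last])
    rw [PySem.List.slice_to_neg_ofNat ys 2 (by omega),
        PySem.List.slice_from ys (a := (2:Int)) (by omega),
        PySem.List.pyGetD_neg_ofNat ys 3 0 (by omega) (by omega),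
        PySem.List.pyGetD_neg_ofNat ys 2 0 (by omega) (by omega),
        PySem.List.pyGetD_eq_getElem ys (i := (1:Int)) 0 (by omega) (by omega),
        PySem.List.pyGetD_eq_getElem ys (i := (2:Int)) 0 (by omega) (by omega)]
    simp only [List.cons_append, List.nil_append, show ((1:Int)).toNat = 1 from rfl,
      show ((2:Int)).toNat = 2 from rfl]
    apply List.ext_getElem
    · simp only [List.length_map, PySem.List.length_enumerate, List.length_zip,
        List.length_cons, List.length_append, List.length_take, List.length_drop]
      omega
    · intro i hi₁ hi₂
      simp only [List.length_map, PySem.List.length_enumerate] at hi₁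
      simp only [List.getElem_map, PySem.List.getElem_enumerate, List.getElem_zip,
        zero_add]
      simp only [Prod.mk.injEq]
      refine ⟨trivial, ?_⟩
      rw [bgm_col_get, bgm_col_get]
      by_cases hi0 : i = 0
      · subst hi0
        simp
      · have hne0 : ((i : Int) == 0) = false := by simp; omega
        simp only [if_neg hi0]
        by_cases hil : i = ys.length - 1
        · have heq : ((i : Int) == (ys.length : Int) - 1) = true := by simp; omega
          simp only [hne0, heq, Bool.false_eq_true, if_false, if_true]
          have ht1 : ¬ (i - 1 < (ys.take (ys.length - 2)).length) := by
            simp only [List.length_take]; omega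
          have ht2 : ¬ (i - 1 < (ys.drop 2).length) := by
            simp only [List.length_drop]; omega
          rw [dif_neg ht1, dif_neg ht2]
        · have hnel : ((i : Int) == (ys.length : Int) - 1) = false := by simp; omega
          simp only [hne0, hnel, Bool.false_eq_true, if_false]
          rw [PySem.List.pyGetD_eq_getElem ys (i := (i : Int) - 1) 0 (by omega) (by omega),
              PySem.List.pyGetD_eq_getElem ys (i := (i : Int) + 1) 0 (by omega) (by omega)]
          have ht1 : i - 1 < (ys.take (ys.length - 2)).length := by
            simp only [List.length_take]; omega
          have ht2 : i - 1 < (ys.drop 2).length := by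
            simp only [List.length_drop]; omega
          rw [dif_pos ht1, dif_pos ht2]
          simp only [List.getElem_take, List.getElem_drop]
          have e1 : ((i : Int) - 1).toNat = i - 1 := by omega
          have e2 : ((i : Int) + 1).toNat = i + 1 := by omega
          have e3 : 2 + (i - 1) = i + 1 := by omega
          simp [e1, e2, e3]

-- ===== VERDICT =====
theorem build_grouptrigger_map_spec : Claim_equal_build_grouptrigger_map := by
  intro xs _
  exact bgm_main xs
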